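-- pv_equiv track=rewrite | github.com/Mathis003/LINFO1361 | Assignement 2/agents/contest_agent.py | hashBoard
-- ===== SOURCE A (Python) =====
-- def hashBoard(boards):
--     board_str = ""
--     for board in boards:
--         positions_white, positions_black = list(board[0]), list(board[1])
--         for pos_idx in range(16):
--                 if pos_idx in positions_white:
--                     board_str += "o"
--                 elif pos_idx in positions_black:
--                     board_str += "x"
--                 else:
--                     board_str += "."
--     return board_str
-- ===== SOURCE B (Python) =====
-- def hashBoard(boards):
--     chunks = []
--     for board in boards:
--         cells = ["."] * 16
--         for p in board[1]:
--             if 0 <= p < 16: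
--                 cells[p] = "x"
--         for p in board[0]:
--             if 0 <= p < 16:
--                 cells[p] = "o"
--         chunks.append("".join(cells))
--     return "".join(chunks)
-- ===== Notes on version B (the rewrite author's own statement) =====
-- stated objective: faster
-- what changed: Replaces the per-index membership scan (16 list searches per board) with a scatter: start from 16 '.' cells, write 'x' at each black position then 'o' at each white position (white overwrites black, matching the elif priority), joining once.
import Mathlib
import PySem

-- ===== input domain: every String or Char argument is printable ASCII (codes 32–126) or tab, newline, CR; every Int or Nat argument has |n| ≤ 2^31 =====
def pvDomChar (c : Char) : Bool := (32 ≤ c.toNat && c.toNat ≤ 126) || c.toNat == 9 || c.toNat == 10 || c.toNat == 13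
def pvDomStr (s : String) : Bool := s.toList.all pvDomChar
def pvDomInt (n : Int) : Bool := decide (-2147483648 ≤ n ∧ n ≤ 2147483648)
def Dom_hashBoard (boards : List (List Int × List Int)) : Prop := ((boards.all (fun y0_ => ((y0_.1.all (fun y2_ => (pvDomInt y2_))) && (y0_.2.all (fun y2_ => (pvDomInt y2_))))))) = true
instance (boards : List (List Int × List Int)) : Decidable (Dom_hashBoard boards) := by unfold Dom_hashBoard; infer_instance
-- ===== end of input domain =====

-- B replaces A's 16 membership scans per board by a scatter into a 16-cell array
-- ('x' at black positions, then 'o' at white, = the elif priority), joined once.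

-- ===== PORT A =====
-- strings are built on the List Char side (Lean's String.append is kernel-opaque);
-- board_str += "o" is acc ++ ['o'].
def hashBoard (boards : List (List Int × List Int)) : String :=
  String.mk
    (boards.foldl (fun board_str board =>
      (PySem.List.pyRange 0 16 1).foldl (fun board_str pos_idx =>
        if pos_idx ∈ board.1 then board_str ++ ['o']
        else if pos_idx ∈ board.2 then board_str ++ ['x']
        else board_str ++ ['.']) board_str) [])

-- ===== PORT B =====
def scatterStep (c : Char) (cells : List Char) (p : Int) : List Char :=
  if 0 ≤ p ∧ p < 16 then cells.set p.toNat c else cells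

def boardCells (board : List Int × List Int) : List Char :=
  board.1.foldl (scatterStep 'o') (board.2.foldl (scatterStep 'x') (List.replicate 16 '.'))

def hashBoard_alt (boards : List (List Int × List Int)) : String :=
  String.mk ((boards.foldl (fun chunks board => chunks ++ [boardCells board]) []).flatten)

-- ===== PRECONDITION & SPEC =====
def Spec_hashBoard (boards : List (List Int × List Int)) (out : String) : Prop := out = hashBoard_alt boards
instance (boards : List (List Int × List Int)) (out : String) : Decidable (Spec_hashBoard boards out) := by unfold Spec_hashBoard; infer_instance

-- ===== CLAIM (what is proved, stated in full; the proofs are below) =====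
def Claim_equal_hashBoard : Prop := ∀ (boards : List (List Int × List Int)), Dom_hashBoard boards → Spec_hashBoard boards (hashBoard boards)

-- ===== LEMMAS AND PROOFS =====

theorem scatterStep_length (c : Char) (cells : List Char) (p : Int) :
    (scatterStep c cells p).length = cells.length := by
  unfold scatterStep; split <;> simp

theorem scatter_length (c : Char) (ps : List Int) (cells : List Char) :
    (ps.foldl (scatterStep c) cells).length = cells.length := by
  induction ps generalizing cells with
  | nil => rfl
  | cons p ps ih => simp [List.foldl, ih, scatterStep_length]

theorem scatter_getD (c : Char) (ps : List Int) (cells : List Char) (i : Nat)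
    (hlen : cells.length = 16) (hi : i < 16) :
    (ps.foldl (scatterStep c) cells).getD i ' '
      = if (i : Int) ∈ ps then c else cells.getD i ' ' := by
  induction ps generalizing cells with
  | nil => simp
  | cons p ps ih =>
    have hsl : (scatterStep c cells p).length = cells.length := scatterStep_length c cells p
    rw [List.foldl_cons, ih (scatterStep c cells p) (by omega)]
    by_cases hps : (i : Int) ∈ ps
    · simp [hps]
    · simp only [hps, if_false, List.mem_cons, or_false]
      by_cases hpi : (i : Int) = p
      · subst hpi
        rw [if_pos rfl]
        unfold scatterStep
        rw [if_pos ⟨Int.natCast_nonneg i, by omega⟩]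
        rw [List.getD_eq_getElem _ _ (by rw [List.length_set]; omega)]
        simp
      · rw [if_neg hpi]
        unfold scatterStep
        split
        · rename_i hr
          have hne : p.toNat ≠ i := by omega
          rw [List.getD_eq_getElem _ _ (by rw [List.length_set]; omega),
              List.getD_eq_getElem _ _ (by omega), List.getElem_set_ne hne]
        · rfl

theorem boardCells_length (board : List Int × List Int) : (boardCells board).length = 16 := by
  unfold boardCells; rw [scatter_length, scatter_length]; simp

theorem charsA_eq (board : List Int × List Int) :
    (PySem.List.pyRange 0 16 1).map (fun pos_idx =>
        if pos_idx ∈ board.1 then 'o' else if pos_idx ∈ board.2 then 'x' else '.')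
      = boardCells board := by
  apply List.ext_getElem
  · simp [PySem.List.length_pyRange_one, boardCells_length]
  · intro i h1 h2
    have hi : i < 16 := by simpa [boardCells_length] using h2
    rw [List.getElem_map, PySem.List.getElem_pyRange_one]
    have hinner : (board.2.foldl (scatterStep 'x') (List.replicate 16 '.')).length = 16 := by
      rw [scatter_length]; simp
    unfold boardCells
    rw [show (board.1.foldl (scatterStep 'o')
          (board.2.foldl (scatterStep 'x') (List.replicate 16 '.')))[i]'h2
        = (board.1.foldl (scatterStep 'o')
            (board.2.foldl (scatterStep 'x') (List.replicate 16 '.'))).getD i ' '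
      from (List.getD_eq_getElem _ _ _).symm]
    rw [scatter_getD 'o' board.1 _ i hinner hi, scatter_getD 'x' board.2 _ i (by simp) hi]
    have hrep : (List.replicate 16 '.').getD i ' ' = '.' := by
      rw [List.getD_eq_getElem _ _ (by simpa using hi), List.getElem_replicate]
    rw [hrep]
    simp

-- ===== VERDICT (by name: the statement is the Claim_ definition above) =====
theorem hashBoard_spec : Claim_equal_hashBoard := by
  intro boards _
  unfold Spec_hashBoard hashBoard hashBoard_alt
  rw [PySem.List.foldl_append_singleton_eq_map, List.nil_append,
      List.flatten_eq_flatMap, List.flatMap_map, Function.id_def]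
  have hinner : ∀ (board : List Int × List Int) (s : List Char),
      (PySem.List.pyRange 0 16 1).foldl (fun board_str pos_idx =>
        if pos_idx ∈ board.1 then board_str ++ ['o']
        else if pos_idx ∈ board.2 then board_str ++ ['x']
        else board_str ++ ['.']) s = s ++ boardCells board := by
    intro board s
    have hstep : (fun (board_str : List Char) (pos_idx : Int) =>
        if pos_idx ∈ board.1 then board_str ++ ['o']
        else if pos_idx ∈ board.2 then board_str ++ ['x']
        else board_str ++ ['.'])
      = fun board_str pos_idx => board_str ++
          [if pos_idx ∈ board.1 then 'o' else if pos_idx ∈ board.2 then 'x' else '.'] := by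
      funext a x; split_ifs <;> rfl
    rw [hstep, PySem.List.foldl_append_singleton_eq_map, charsA_eq]
  have houter : ∀ (bs : List (List Int × List Int)) (s : List Char),
      bs.foldl (fun board_str board =>
        (PySem.List.pyRange 0 16 1).foldl (fun board_str pos_idx =>
          if pos_idx ∈ board.1 then board_str ++ ['o']
          else if pos_idx ∈ board.2 then board_str ++ ['x']
          else board_str ++ ['.']) board_str) s
        = s ++ bs.flatMap boardCells := by
    intro bs
    induction bs with
    | nil => simp
    | cons b bs ih => intro s; rw [List.foldl_cons, ih, hinner]; simp
  rw [houter, List.nil_append]
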